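-- pv_equiv track=rewrite | github.com/tdb-alcorn/stats | sample.py | dict_sub
-- ===== SOURCE A (Python) =====
-- def dict_sub(dict1, dict2):
--     '''
--     Returns {key: dict1[key]-dict2[key]} for each key where default value
--     is dict_i[key] = 0 if a dict does not contain key.
--     '''
--     result = dict()
--     keys = set(dict1.keys()).union(set(dict2.keys()))
--     for k in keys:
--         value1 = dict1[k] if k in dict1 else 0
--         value2 = dict2[k] if k in dict2 else 0
--         result[k] = value1 - value2
--     return result
-- ===== SOURCE B (Python) =====
-- def dict_sub(dict1, dict2):
--     result = dict(dict1)
--     for k, v in dict2.items():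
--         result[k] = result.get(k, 0) - v
--     return result
-- ===== Notes on version B (the rewrite author's own statement) =====
-- stated objective: simpler
-- what changed: B starts from a shallow copy of dict1 and subtracts dict2 in a single pass over dict2.items(), eliminating A's union-of-key-sets construction and the two symmetric membership guards.
import Mathlib
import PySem

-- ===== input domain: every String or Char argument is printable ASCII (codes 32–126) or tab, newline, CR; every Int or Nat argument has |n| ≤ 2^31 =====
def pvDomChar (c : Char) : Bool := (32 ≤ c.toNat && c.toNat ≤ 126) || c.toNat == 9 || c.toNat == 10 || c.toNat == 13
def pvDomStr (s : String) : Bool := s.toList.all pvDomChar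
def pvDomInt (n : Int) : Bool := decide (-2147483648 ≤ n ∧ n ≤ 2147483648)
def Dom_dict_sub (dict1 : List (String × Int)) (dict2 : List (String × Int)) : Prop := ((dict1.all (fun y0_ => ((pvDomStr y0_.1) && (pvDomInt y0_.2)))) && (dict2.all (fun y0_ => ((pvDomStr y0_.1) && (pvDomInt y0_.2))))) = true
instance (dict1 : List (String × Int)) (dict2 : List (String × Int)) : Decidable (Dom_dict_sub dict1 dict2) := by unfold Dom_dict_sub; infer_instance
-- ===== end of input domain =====

-- B replaces A's union-of-key-sets loop by one pass over dict2 starting from a copy of dict1 (objective: simpler).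
-- Note: A's Python iterates its key set in hash order; the port iterates it in first-insertion order — the returned
-- dict is the same dict (dict outputs are compared order-insensitively).

-- ===== PORT A =====
def dict_sub (dict1 : List (String × Int)) (dict2 : List (String × Int)) : List (String × Int) :=
  let d1 : PySem.Dict String Int := PySem.Dict.ofList dict1
  let d2 : PySem.Dict String Int := PySem.Dict.ofList dict2
  let keys : PySem.Set String :=
    PySem.Set.union (PySem.Set.ofList d1.keys) (PySem.Set.ofList d2.keys)
  (keys.foldl (fun result k =>
      let value1 := if d1.contains k then d1.getD k 0 else 0
      let value2 := if d2.contains k then d2.getD k 0 else 0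
      result.insert k (value1 - value2)) PySem.Dict.empty).items

-- ===== PORT B =====
def dict_sub_alt (dict1 : List (String × Int)) (dict2 : List (String × Int)) : List (String × Int) :=
  let d2 : PySem.Dict String Int := PySem.Dict.ofList dict2
  (d2.items.foldl (fun result p => result.insert p.1 (result.getD p.1 0 - p.2))
      (PySem.Dict.ofList dict1)).items

-- ===== PRECONDITION & SPEC =====
def Spec_dict_sub (dict1 : List (String × Int)) (dict2 : List (String × Int)) (out : List (String × Int)) : Prop := out = dict_sub_alt dict1 dict2
instance (dict1 : List (String × Int)) (dict2 : List (String × Int)) (out : List (String × Int)) : Decidable (Spec_dict_sub dict1 dict2 out) := by unfold Spec_dict_sub; infer_instance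

-- ===== CLAIM (what is proved, stated in full; the proofs are below) =====
def Claim_equal_dict_sub : Prop := ∀ (dict1 : List (String × Int)) (dict2 : List (String × Int)), Dom_dict_sub dict1 dict2 → Spec_dict_sub dict1 dict2 (dict_sub dict1 dict2)

-- ===== LEMMAS AND PROOFS =====

lemma pv_keys_eq_map_items (d : PySem.Dict String Int) : d.items.map (fun p => p.1) = d.keys := by
  cases d with
  | mk ps => simp [PySem.Dict.keys_mk]

lemma pv_mk_items (d : PySem.Dict String Int) : PySem.Dict.mk d.items = d := rfl

-- A dict with nodup keys is its key list paired with its lookups.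
lemma pv_items_eq_map_keys (d : PySem.Dict String Int) (h : d.keys.Nodup) :
    d.items = d.keys.map (fun k => (k, d.getD k 0)) := by
  have hk : d.keys = d.items.map (fun p => p.1) := (pv_keys_eq_map_items d).symm
  rw [hk, List.map_map]
  conv_lhs => rw [show d.items = d.items.map id from (List.map_id _).symm]
  exact List.map_congr_left fun p hp => by
    have hv : d.getD p.1 0 = p.2 :=
      PySem.Dict.getD_of_mem_items d (by simpa using hp) h 0
    simp [Function.comp, hv]

-- A's loop: inserting fresh keys appends them in order.
lemma pv_foldA (f : String → Int) :
    ∀ (ks : List String) (r : PySem.Dict String Int), ks.Nodup → (∀ k ∈ ks, k ∉ r.keys) →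
      (ks.foldl (fun d k => d.insert k (f k)) r).items = r.items ++ ks.map (fun k => (k, f k)) := by
  intro ks
  induction ks with
  | nil => intro r _ _; simp
  | cons k t ih =>
    intro r hnd hdis
    have hkn : k ∉ r.keys := hdis k (List.mem_cons_self ..)
    have hc : r.contains k = false := by
      rw [PySem.Dict.contains_eq_decide_mem_keys]; simpa using hkn
    have hkeys : (r.insert k (f k)).keys = r.keys ++ [k] :=
      PySem.Dict.keys_insert_of_not_contains r (f k) hc
    have hdis' : ∀ x ∈ t, x ∉ (r.insert k (f k)).keys := by
      intro x hx
      rw [hkeys]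
      simp only [List.mem_append, List.mem_singleton]
      rintro (h1 | h2)
      · exact hdis x (List.mem_cons_of_mem _ hx) h1
      · exact (List.nodup_cons.mp hnd).1 (h2 ▸ hx)
    rw [List.foldl_cons, ih _ (List.nodup_cons.mp hnd).2 hdis',
        PySem.Dict.items_insert_of_not_contains r (f k) hc]
    simp

-- B's loop, key order: keys of the accumulator, then the new keys in order.
lemma pv_foldB_keys :
    ∀ (ps : List (String × Int)) (r : PySem.Dict String Int), (ps.map (fun p => p.1)).Nodup →
      (ps.foldl (fun d p => d.insert p.1 (d.getD p.1 0 - p.2)) r).keys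
        = r.keys ++ (ps.map (fun p => p.1)).filter (fun k => !(r.contains k)) := by
  intro ps
  induction ps with
  | nil => intro r _; simp
  | cons p t ih =>
    intro r hnd
    simp only [List.map_cons, List.nodup_cons] at hnd
    have hne : ∀ x ∈ t.map (fun p => p.1), x ≠ p.1 := fun x hx he => hnd.1 (he ▸ hx)
    have hfc : ∀ x ∈ t.map (fun p => p.1),
        ((r.insert p.1 (r.getD p.1 0 - p.2)).contains x) = (r.contains x) := by
      intro x hx
      rw [PySem.Dict.contains_insert]
      have : (x == p.1) = false := by simpa using hne x hx
      simp [this]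
    by_cases hc : r.contains p.1 = true
    · have hkeys : (r.insert p.1 (r.getD p.1 0 - p.2)).keys = r.keys :=
        PySem.Dict.keys_insert_of_contains r _ hc
      rw [List.foldl_cons, ih _ hnd.2, hkeys,
          List.filter_congr (fun x hx => by rw [hfc x hx])]
      simp [hc]
    · have hc' : r.contains p.1 = false := by simpa using hc
      have hkeys : (r.insert p.1 (r.getD p.1 0 - p.2)).keys = r.keys ++ [p.1] :=
        PySem.Dict.keys_insert_of_not_contains r _ hc'
      rw [List.foldl_cons, ih _ hnd.2, hkeys,
          List.filter_congr (fun x hx => by rw [hfc x hx])]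
      simp [hc']

-- B's loop, values: the accumulator's value minus dict2's value (default 0 each).
lemma pv_foldB_getD :
    ∀ (ps : List (String × Int)) (r : PySem.Dict String Int) (k : String), (ps.map (fun p => p.1)).Nodup →
      (ps.foldl (fun d p => d.insert p.1 (d.getD p.1 0 - p.2)) r).getD k 0
        = r.getD k 0 - (PySem.Dict.mk ps).getD k 0 := by
  intro ps
  induction ps with
  | nil =>
    intro r k _
    have h0 : (PySem.Dict.mk ([] : List (String × Int))).getD k 0 = 0 := rfl
    simp [h0]
  | cons p t ih =>
    intro r k hnd
    simp only [List.map_cons, List.nodup_cons] at hnd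
    rw [List.foldl_cons, ih _ k hnd.2]
    by_cases hk : k = p.1
    · have h1 : (r.insert p.1 (r.getD p.1 0 - p.2)).getD k 0 = r.getD p.1 0 - p.2 := by
        rw [hk, PySem.Dict.getD_insert]
        simp
      have h2 : (PySem.Dict.mk t).getD k 0 = 0 := by
        rw [PySem.Dict.getD_eq_get?_getD]
        have hnone : (PySem.Dict.mk t).get? k = none := by
          rw [PySem.Dict.get?_eq_none_iff_not_mem_keys]
          rw [hk]
          simpa [PySem.Dict.keys_mk] using hnd.1
        simp [hnone]
      have h3 : (PySem.Dict.mk (p :: t)).getD k 0 = p.2 := by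
        rw [PySem.Dict.getD_eq_get?_getD]
        have hsome : (PySem.Dict.mk (p :: t)).get? k = some p.2 := by
          have hbeq : (p.1 == k) = true := by simp [hk]
          rw [PySem.Dict.get?_mk_cons]
          simp [hbeq]
        simp [hsome]
      rw [h1, h2, h3, hk]; ring
    · have h1 : (r.insert p.1 (r.getD p.1 0 - p.2)).getD k 0 = r.getD k 0 := by
        simp [PySem.Dict.getD_insert, hk]
      have h3 : (PySem.Dict.mk (p :: t)).getD k 0 = (PySem.Dict.mk t).getD k 0 := by
        rw [PySem.Dict.getD_eq_get?_getD, PySem.Dict.getD_eq_get?_getD]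
        have hne : (p.1 == k) = false := by simp [Ne.symm hk]
        rw [PySem.Dict.get?_mk_cons]
        simp [hne]
      rw [h1, h3]

-- ===== VERDICT (by name: the statement is the Claim_ definition above) =====
theorem dict_sub_spec : Claim_equal_dict_sub := by
  intro dict1 dict2 _
  unfold Spec_dict_sub
  set d1 : PySem.Dict String Int := PySem.Dict.ofList dict1 with hd1
  set d2 : PySem.Dict String Int := PySem.Dict.ofList dict2 with hd2
  have hn1 : d1.keys.Nodup := PySem.Dict.nodup_keys_ofList dict1
  have hn2 : d2.keys.Nodup := PySem.Dict.nodup_keys_ofList dict2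
  -- the union key set, explicitly
  have hU : PySem.Set.union (PySem.Set.ofList d1.keys) (PySem.Set.ofList d2.keys)
      = d1.keys ++ d2.keys.filter (fun k => !(d1.contains k)) := by
    show PySem.Set.update (PySem.Set.ofList d1.keys) (PySem.Set.ofList d2.keys) = _
    rw [PySem.Set.update_eq_append_filter, PySem.Set.ofList_ofList,
        PySem.Set.ofList_eq_self_of_nodup _ hn1, PySem.Set.ofList_eq_self_of_nodup _ hn2]
    congr 1
    apply List.filter_congr
    intro x _
    rw [PySem.Set.contains_eq_listContains, PySem.Dict.contains_eq_decide_mem_keys]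
    simp
  have hUnd : (d1.keys ++ d2.keys.filter (fun k => !(d1.contains k))).Nodup := by
    refine List.Nodup.append hn1 (hn2.filter _) ?_
    intro x hx1 hx2
    have hx3 := List.of_mem_filter hx2
    rw [PySem.Dict.contains_eq_decide_mem_keys] at hx3
    simp at hx3
    exact hx3 hx1
  have hvals : ∀ k : String,
      (if d1.contains k then d1.getD k 0 else 0) - (if d2.contains k then d2.getD k 0 else 0)
        = d1.getD k 0 - d2.getD k 0 := by
    intro k
    cases hc1 : d1.contains k <;> cases hc2 : d2.contains k <;>
      simp [hc1, hc2, PySem.Dict.getD_of_not_contains]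
  have hA : dict_sub dict1 dict2
      = (d1.keys ++ d2.keys.filter (fun k => !(d1.contains k))).map
          (fun k => (k, d1.getD k 0 - d2.getD k 0)) := by
    show ((PySem.Set.union (PySem.Set.ofList d1.keys) (PySem.Set.ofList d2.keys)).foldl
        (fun result k => result.insert k
          ((if d1.contains k then d1.getD k 0 else 0) - (if d2.contains k then d2.getD k 0 else 0)))
        PySem.Dict.empty).items = _
    rw [hU, pv_foldA _ _ _ hUnd (by simp [PySem.Dict.keys_empty])]
    have hemp : (PySem.Dict.empty : PySem.Dict String Int).items = [] := rfl
    rw [hemp, List.nil_append]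
    exact List.map_congr_left (fun k _ => by rw [hvals k])
  have hnd2' : (d2.items.map (fun p => p.1)).Nodup := by
    rw [pv_keys_eq_map_items]; exact hn2
  have hBkeys := pv_foldB_keys d2.items d1 hnd2'
  rw [pv_keys_eq_map_items] at hBkeys
  have hBnodup : ((d2.items.foldl
      (fun d p => d.insert p.1 (d.getD p.1 0 - p.2)) d1)).keys.Nodup := by
    rw [hBkeys]; exact hUnd
  have hB : dict_sub_alt dict1 dict2
      = (d1.keys ++ d2.keys.filter (fun k => !(d1.contains k))).map
          (fun k => (k, d1.getD k 0 - d2.getD k 0)) := by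
    show ((d2.items.foldl (fun result p => result.insert p.1 (result.getD p.1 0 - p.2)) d1)).items = _
    rw [pv_items_eq_map_keys _ hBnodup, hBkeys]
    exact List.map_congr_left (fun k _ => by
      rw [pv_foldB_getD d2.items d1 k hnd2', pv_mk_items])
  rw [hA, hB]
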